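-- pv_equiv track=rewrite | github.com/intelligenceafa-cloud/Auto-Prov | clusterlogs_atlas/sample-atlas.py | parse_seed_id
-- ===== SOURCE A (Python) =====
-- from typing import List, Dict, Set, Tuple
--
-- def parse_seed_id(seed_id: str) -> Tuple[str, str, str, int]:
--     try:
--         last_underscore = seed_id.rfind('_')
--         if last_underscore == -1:
--             return "", "", "", 0
--
--         index = int(seed_id[last_underscore + 1:])
--         remainder = seed_id[:last_underscore]
--
--         parts = remainder.split('_')
--         for i, part in enumerate(parts):
--             if part in ['audit', 'dns', 'firefox']:
--                 scenario = '_'.join(parts[:i])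
--                 log_type = part
--                 timestamp = '_'.join(parts[i+1:])
--                 return scenario, log_type, timestamp, index
--
--         return "", "", "", 0
--     except ValueError:
--         return "", "", "", 0
-- ===== SOURCE B (Python) =====
-- def parse_seed_id(seed_id):
--     head, sep, tail = seed_id.rpartition('_')
--     if not sep:
--         return "", "", "", 0
--     try:
--         index = int(tail)
--     except ValueError:
--         return "", "", "", 0
--     scenario = []
--     rest = head.split('_')
--     while rest:
--         tok = rest.pop(0)
--         if tok in ('audit', 'dns', 'firefox'):
--             return '_'.join(scenario), tok, '_'.join(rest), index
--         scenario.append(tok)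
--     return "", "", "", 0
-- ===== Notes on version B (the rewrite author's own statement) =====
-- stated objective: simpler
-- what changed: B uses str.rpartition('_') instead of rfind plus manual slicing, and replaces A's enumerate-over-parts loop that re-slices and re-joins parts[:i]/parts[i+1:] by a single accumulator pass that consumes tokens from the front.
import Mathlib
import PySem

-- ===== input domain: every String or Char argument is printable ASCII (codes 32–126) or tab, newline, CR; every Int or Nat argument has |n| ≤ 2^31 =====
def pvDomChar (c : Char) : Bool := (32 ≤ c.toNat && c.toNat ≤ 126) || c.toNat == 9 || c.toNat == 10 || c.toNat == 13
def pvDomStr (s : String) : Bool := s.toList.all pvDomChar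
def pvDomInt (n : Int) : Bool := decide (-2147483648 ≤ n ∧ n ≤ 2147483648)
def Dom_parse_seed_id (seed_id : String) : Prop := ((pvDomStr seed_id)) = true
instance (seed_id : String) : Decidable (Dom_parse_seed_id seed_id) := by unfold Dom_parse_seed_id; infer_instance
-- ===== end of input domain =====

-- B replaces A's enumerate-and-reslice keyword scan by rpartition plus a single
-- accumulator pass over the tokens (objective: idiomatic/simpler decomposition).

-- ===== PORT A =====
-- the keyword membership test `part in ['audit', 'dns', 'firefox']`
def pvKeywords : List (List Char) := ["audit".toList, "dns".toList, "firefox".toList]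

-- A's `for i, part in enumerate(parts): …` loop, with `parts[:i]` / `parts[i+1:]` as slices
def parseA_go (parts : List (List Char)) (index : Int) :
    List (Int × List Char) → String × String × String × Int
  | [] => ("", "", "", 0)
  | (i, part) :: rest =>
    if part ∈ pvKeywords then
      (String.ofList (PySem.Chars.join ['_'] (PySem.List.slice parts none (some i))),
       String.ofList part,
       String.ofList (PySem.Chars.join ['_'] (PySem.List.slice parts (some (i + 1)) none)),
       index)
    else parseA_go parts index rest

def parse_seed_id (seed_id : String) : String × String × String × Int :=
  let cs := seed_id.toList
  let lastUnderscore := PySem.Chars.rfind cs ['_']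
  if lastUnderscore = -1 then ("", "", "", 0)
  else
    match PySem.Int.ofChars? (PySem.Chars.slice cs (some (lastUnderscore + 1)) none) with
    | none => ("", "", "", 0)  -- int() raised ValueError
    | some index =>
      let remainder := PySem.Chars.slice cs none (some lastUnderscore)
      let parts := PySem.Chars.splitOn remainder ['_']
      parseA_go parts index (PySem.List.enumerate parts 0)

-- ===== PORT B =====
-- hand port of str.rpartition('_') (PySem has no rpartition); exact for the
-- single-character separator '_': (s[:i], '_', s[i+1:]) or ('', '', s) when absent
def pyRPartitionUnderscore (cs : List Char) : List Char × List Char × List Char :=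
  let i := PySem.Chars.rfind cs ['_']
  if i = -1 then ([], [], cs)
  else (PySem.Chars.slice cs none (some i), ['_'], PySem.Chars.slice cs (some (i + 1)) none)

-- B's `while rest: tok = rest.pop(0) …` loop with the `scenario` accumulator
def parseB_go (index : Int) (scenario : List (List Char)) :
    List (List Char) → String × String × String × Int
  | [] => ("", "", "", 0)
  | tok :: rest =>
    if tok ∈ pvKeywords then
      (String.ofList (PySem.Chars.join ['_'] scenario),
       String.ofList tok,
       String.ofList (PySem.Chars.join ['_'] rest),
       index)
    else parseB_go index (scenario ++ [tok]) rest

def parse_seed_id_alt (seed_id : String) : String × String × String × Int :=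
  let p := pyRPartitionUnderscore seed_id.toList
  let head := p.1
  let sep := p.2.1
  let tail := p.2.2
  if sep = [] then ("", "", "", 0)
  else
    match PySem.Int.ofChars? tail with
    | none => ("", "", "", 0)  -- int() raised ValueError
    | some index => parseB_go index [] (PySem.Chars.splitOn head ['_'])

-- ===== PRECONDITION & SPEC =====
def Spec_parse_seed_id (seed_id : String) (out : String × String × String × Int) : Prop := out = parse_seed_id_alt seed_id
instance (seed_id : String) (out : String × String × String × Int) : Decidable (Spec_parse_seed_id seed_id out) := by unfold Spec_parse_seed_id; infer_instance

-- ===== CLAIM (what is proved, stated in full; the proofs are below) =====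
def Claim_equal_parse_seed_id : Prop := ∀ (seed_id : String), Dom_parse_seed_id seed_id → Spec_parse_seed_id seed_id (parse_seed_id seed_id)

-- ===== LEMMAS AND PROOFS =====

-- A's enumerate loop over done ++ rest, already past `done`, equals B's accumulator loop
theorem go_eq (index : Int) (rest : List (List Char)) :
    ∀ done : List (List Char),
      parseA_go (done ++ rest) index (PySem.List.enumerate rest (done.length : Int)) =
        parseB_go index done rest := by
  induction rest with
  | nil => intro done; simp [PySem.List.enumerate_nil, parseA_go, parseB_go]
  | cons tok rest ih =>
    intro done
    rw [PySem.List.enumerate_cons]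
    by_cases h : tok ∈ pvKeywords
    · simp only [parseA_go, parseB_go, h, if_pos]
      have h1 : PySem.List.slice (done ++ tok :: rest) none (some (done.length : Int)) = done := by
        rw [PySem.List.slice_to _ (by positivity)]
        simp
      have h2 : PySem.List.slice (done ++ tok :: rest) (some ((done.length : Int) + 1)) none = rest := by
        rw [PySem.List.slice_from _ (by positivity)]
        have : ((done.length : Int) + 1).toNat = done.length + 1 := by omega
        rw [this]
        rw [show done.length + 1 = (done ++ [tok]).length by simp]
        rw [show done ++ tok :: rest = (done ++ [tok]) ++ rest by simp]
        simp
      rw [h1, h2]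
    · simp only [parseA_go, parseB_go, h, if_neg, not_false_iff]
      have := ih (done ++ [tok])
      simpa using this

theorem parse_seed_id_eq (seed_id : String) :
    parse_seed_id seed_id = parse_seed_id_alt seed_id := by
  unfold parse_seed_id parse_seed_id_alt pyRPartitionUnderscore
  by_cases h : PySem.Chars.rfind seed_id.toList ['_'] = -1
  · simp [h]
  · simp only [h, if_neg, not_false_iff]
    cases PySem.Int.ofChars?
        (PySem.Chars.slice seed_id.toList (some (PySem.Chars.rfind seed_id.toList ['_'] + 1)) none) with
    | none => simp
    | some idx =>
      simp only []
      have := go_eq idx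
          (PySem.Chars.splitOn
            (PySem.Chars.slice seed_id.toList none (some (PySem.Chars.rfind seed_id.toList ['_']))) ['_']) []
      simpa using this.symm ▸ rfl

-- ===== VERDICT (by name: the statement is the Claim_ definition above) =====
theorem parse_seed_id_spec : Claim_equal_parse_seed_id := by
  intro s _
  unfold Spec_parse_seed_id
  exact parse_seed_id_eq s
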